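-- pv_equiv track=rewrite | github.com/T-Automation/Python_Calisma_Saati | automation/scripts/tlcst.py | command_to_list
-- ===== SOURCE A (Python) =====
-- def command_to_list(commands):
--     single_line = list()
--     multi_line = list()
--     temp = str()
--     intended = False
--     for index, value in reversed(list(enumerate(commands))):
--         if value[0] == ' ' or value[0] == '\t':
--             intended = True
--             if temp == '': temp = value.strip()
--             else: temp = f'{value.strip()}\n{temp}'
--         elif intended:
--             intended = False
--             multi_line.insert(0, f'{value.strip()}\n{temp}')
--             temp = str()
--         else:
--             single_line.insert(0, value.strip())
--     return multi_line, single_line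
-- ===== SOURCE B (Python) =====
-- def command_to_list(commands):
--     multi_line, single_line = [], []
--     header = None
--     block = []
--
--     def flush():
--         if header is None:
--             return
--         if block:
--             trimmed = list(block)
--             while trimmed and trimmed[-1] == '':
--                 trimmed.pop()
--             multi_line.append(f"{header}\n" + "\n".join(trimmed))
--         else:
--             single_line.append(header)
--
--     for line in commands:
--         if line.startswith((' ', '\t')):
--             if header is not None:
--                 block.append(line.strip())
--         else:
--             flush()
--             header = line.strip()
--             block = []
--     flush()
--     return multi_line, single_line
-- ===== Notes on version B (the rewrite author's own statement) =====
-- stated objective: idiomatic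
-- what changed: A scans the list backwards with insert(0,...) and grows a temp string by repeated front-concatenation guarded by an 'intended' flag; B scans forward once keeping a pending header plus a block list of stripped indented lines, flushing each group with a single join after popping trailing whitespace-only lines.
import Mathlib
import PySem

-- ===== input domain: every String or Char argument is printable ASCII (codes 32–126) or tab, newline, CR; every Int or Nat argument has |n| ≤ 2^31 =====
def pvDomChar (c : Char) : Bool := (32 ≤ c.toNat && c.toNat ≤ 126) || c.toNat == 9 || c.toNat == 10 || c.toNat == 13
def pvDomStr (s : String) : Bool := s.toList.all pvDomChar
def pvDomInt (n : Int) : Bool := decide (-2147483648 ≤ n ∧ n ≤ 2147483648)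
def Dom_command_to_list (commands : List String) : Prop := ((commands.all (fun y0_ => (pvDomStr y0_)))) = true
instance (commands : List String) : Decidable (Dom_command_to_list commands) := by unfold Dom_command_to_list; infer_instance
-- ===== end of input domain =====

-- B replaces A's backward scan with accumulator-string surgery by a forward pass
-- keeping a pending header and a block list, flushed at each non-indented line (objective: idiomatic).

-- ===== PORT A =====
-- one step of A's loop over reversed(list(enumerate(commands))); state = (single_line, multi_line, temp, intended)
def ctl_stepA (st : List String × List String × String × Bool) (iv : Int × String) :
    List String × List String × String × Bool :=
  match st with
  | (single, multi, temp, intended) =>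
    let value := iv.2
    if PySem.Str.pyGet? value 0 == some ' ' || PySem.Str.pyGet? value 0 == some '\t' then
      (single, multi, (if temp = "" then PySem.Str.strip value
                       else PySem.Str.strip value ++ "\n" ++ temp), true)
    else if intended then
      (single, (PySem.Str.strip value ++ "\n" ++ temp) :: multi, "", false)
    else
      (PySem.Str.strip value :: single, multi, temp, intended)

def command_to_list (commands : List String) : List String × List String :=
  match (PySem.List.enumerate commands 0).reverse.foldl ctl_stepA ([], [], "", false) with
  | (single, multi, _, _) => (multi, single)

-- ===== PORT B =====
-- 'while trimmed and trimmed[-1] == '': trimmed.pop()'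
def ctl_popTrail (b : List String) : List String :=
  if h : b.getLast? = some "" then ctl_popTrail b.dropLast else b
termination_by b.length
decreasing_by
  have hne : b ≠ [] := fun hn => by simp [hn] at h
  have := List.length_pos_of_ne_nil hne
  simp only [List.length_dropLast]; omega

-- Source B's flush(): emit the pending header (if any) with its trimmed block
def ctl_flush (header : Option String) (block : List String) (multi single : List String) :
    List String × List String :=
  match header with
  | none => (multi, single)
  | some hd =>
    if block ≠ [] then
      (multi ++ [hd ++ "\n" ++ PySem.Str.join "\n" (ctl_popTrail block)], single)
    else
      (multi, single ++ [hd])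

-- one step of Source B's forward loop; state = (multi_line, single_line, header, block)
def ctl_stepB (st : List String × List String × Option String × List String) (line : String) :
    List String × List String × Option String × List String :=
  match st with
  | (multi, single, header, block) =>
    if PySem.Str.startswith line " " || PySem.Str.startswith line "\t" then
      match header with
      | some _ => (multi, single, header, block ++ [PySem.Str.strip line])
      | none => (multi, single, header, block)
    else
      match ctl_flush header block multi single with
      | (multi', single') => (multi', single', some (PySem.Str.strip line), [])

-- the final flush() after the loop
def ctl_finish (st : List String × List String × Option String × List String) :
    List String × List String :=
  ctl_flush st.2.2.1 st.2.2.2 st.1 st.2.1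

def command_to_list_alt (commands : List String) : List String × List String :=
  ctl_finish (commands.foldl ctl_stepB ([], [], none, []))

-- ===== PRECONDITION & SPEC =====
-- Pre_ excludes lists containing an empty string: on those Python A raises IndexError (value[0])
-- and returns nothing; B treats an empty line as a non-indented single-line command.
def Pre_command_to_list (commands : List String) : Prop := ∀ s ∈ commands, s ≠ ""
instance (commands : List String) : Decidable (Pre_command_to_list commands) := by
  unfold Pre_command_to_list; infer_instance

def pvWitness_command_to_list : List String := ["a b", "  c", "\td", "e"]

def Spec_command_to_list (commands : List String) (out : List String × List String) : Prop :=
  out = command_to_list_alt commands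
instance (commands : List String) (out : List String × List String) :
    Decidable (Spec_command_to_list commands out) := by unfold Spec_command_to_list; infer_instance

-- ===== CLAIM (what is proved, stated in full; the proofs are below) =====
def Claim_equal_command_to_list : Prop := ∀ (commands : List String),
  Dom_command_to_list commands → Pre_command_to_list commands →
  Spec_command_to_list commands (command_to_list commands)

-- ===== LEMMAS AND PROOFS =====

-- the test A performs on each line: first character is a space or a tab
def ctlIndented (s : String) : Bool :=
  PySem.Str.pyGet? s 0 == some ' ' || PySem.Str.pyGet? s 0 == some '\t'

-- A's loop, read as a right fold over the commands themselves (the index is unused)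
def ctlAFold (cmds : List String) : List String × List String × String × Bool :=
  cmds.foldr (fun v st => ctl_stepA st (0, v)) ([], [], "", false)

-- A's temp accumulation over a block of already-stripped lines, processed back to front
def ctlTemp (blk : List String) (t : String) : String :=
  blk.foldr (fun s acc => if acc = "" then s else s ++ "\n" ++ acc) t

-- the joint reference result: B's pending state (h, blk) combined with A's fold over the rest
def ctlRef (M S : List String) (h : Option String) (blk : List String)
    (r : List String × List String × String × Bool) : List String × List String :=
  match r, h with
  | (s, m, _, _), none => (M ++ m, S ++ s)
  | (s, m, t, i), some hd =>
    if i || !blk.isEmpty then (M ++ (hd ++ "\n" ++ ctlTemp blk t) :: m, S ++ s)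
    else (M ++ m, S ++ hd :: s)

theorem ctl_startswith_eq (s : String) :
    (PySem.Str.startswith s " " || PySem.Str.startswith s "\t") = ctlIndented s := by
  rcases hs : s.toList with _ | ⟨c, cs⟩ <;>
    simp [PySem.Str.startswith, PySem.Str.pyGet?, PySem.Chars.startswith, hs, ctlIndented,
      PySem.Chars.pyGet?, PySem.List.pyGet?, PySem.List.pyIdx?, List.isPrefixOf, BEq.comm]

theorem ctl_enum_foldr (cmds : List String) (s0 : Int) :
    (PySem.List.enumerate cmds s0).foldr (fun p st => ctl_stepA st p) ([], [], "", false) =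
      ctlAFold cmds := by
  induction cmds generalizing s0 with
  | nil => rfl
  | cons x xs ih =>
    rw [PySem.List.enumerate_cons]
    simp only [List.foldr_cons, ih, ctlAFold]
    rfl

theorem ctl_concat_ne (s t : String) : s ++ "\n" ++ t ≠ "" := by
  intro h
  have := congrArg String.toList h
  simp at this

-- join cons for nonempty tail, as Strings

theorem ctl_temp_of_not_intended (cmds : List String) :
    (ctlAFold cmds).2.2.2 = false → (ctlAFold cmds).2.2.1 = "" := by
  induction cmds with
  | nil => intro; rfl
  | cons x xs ih =>
    have : ctlAFold (x :: xs) = ctl_stepA (ctlAFold xs) (0, x) := rfl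
    rw [this]
    rcases hA : ctlAFold xs with ⟨s, m, t, i⟩
    simp only [ctl_stepA]
    split_ifs with h1 h2 <;> simp_all

theorem ctl_join_cons (x y : String) (ys : List String) :
    PySem.Str.join "\n" (x :: y :: ys) = x ++ "\n" ++ PySem.Str.join "\n" (y :: ys) := by
  apply String.ext
  simp [PySem.Str.join, PySem.Chars.join_cons_cons]

theorem ctl_join_single (x : String) : PySem.Str.join "\n" [x] = x := by
  apply String.ext
  simp [PySem.Str.join, PySem.Chars.join, List.intercalate]

theorem ctl_join_no_trail (b : List String) (hb : b.getLast? ≠ some "") :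
    PySem.Str.join "\n" b = ctlTemp b "" ∧ (b ≠ [] → PySem.Str.join "\n" b ≠ "") := by
  induction b with
  | nil => exact ⟨rfl, fun h => absurd rfl h⟩
  | cons x xs ih =>
    rcases xs with _ | ⟨y, ys⟩
    · simp only [List.getLast?_singleton] at hb
      have hx : x ≠ "" := fun h => hb (by rw [h])
      refine ⟨?_, fun _ => by rw [ctl_join_single]; exact hx⟩
      rw [ctl_join_single]; simp [ctlTemp]
    · have hb' : (y :: ys).getLast? ≠ some "" := by
        rwa [List.getLast?_cons_cons] at hb
      obtain ⟨ih1, ih2⟩ := ih hb'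
      have hne : PySem.Str.join "\n" (y :: ys) ≠ "" := ih2 (by simp)
      rw [ctl_join_cons]
      constructor
      · rw [show ctlTemp (x :: y :: ys) "" =
              (if ctlTemp (y :: ys) "" = "" then x else x ++ "\n" ++ ctlTemp (y :: ys) "") from rfl,
            ← ih1]
        simp [hne]
      · intro _; exact ctl_concat_ne _ _

theorem ctl_join_popTrail (b : List String) :
    PySem.Str.join "\n" (ctl_popTrail b) = ctlTemp b "" := by
  induction b using ctl_popTrail.induct with
  | case1 b h ih =>
    rw [ctl_popTrail]; simp only [h, dite_true]
    rw [ih]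
    have hne : b ≠ [] := fun hn => by simp [hn] at h
    have hsplit : b = b.dropLast ++ [""] := by
      conv_lhs => rw [← List.dropLast_append_getLast hne]
      congr 1
      simp [List.getLast?_eq_some_getLast hne] at h
      simp [h]
  -- hmm
    conv_rhs => rw [hsplit]
    simp only [ctlTemp, List.foldr_append, List.foldr_cons, List.foldr_nil]
    simp
  | case2 b h =>
    rw [ctl_popTrail]; simp only [h, dite_false]
    exact (ctl_join_no_trail b h).1

theorem ctl_stepA_eq (s m : List String) (t : String) (i : Bool) (x : String) :
    ctl_stepA (s, m, t, i) (0, x) =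
      if ctlIndented x then
        (s, m, (if t = "" then PySem.Str.strip x else PySem.Str.strip x ++ "\n" ++ t), true)
      else if i then (s, (PySem.Str.strip x ++ "\n" ++ t) :: m, "", false)
      else (PySem.Str.strip x :: s, m, t, i) := rfl

theorem ctl_stepB_eq (M S : List String) (h : Option String) (blk : List String) (x : String) :
    ctl_stepB (M, S, h, blk) x =
      if ctlIndented x then
        (match h with
         | some _ => (M, S, h, blk ++ [PySem.Str.strip x])
         | none => (M, S, h, blk))
      else
        (match ctl_flush h blk M S with
         | (multi', single') => (multi', single', some (PySem.Str.strip x), [])) := by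
  simp only [ctl_stepB]
  rw [ctl_startswith_eq]

theorem ctl_main (cmds : List String) : ∀ (M S : List String) (h : Option String)
    (blk : List String),
    ctl_finish (cmds.foldl ctl_stepB (M, S, h, blk)) = ctlRef M S h blk (ctlAFold cmds) := by
  induction cmds with
  | nil =>
    intro M S h blk
    rcases h with _ | hd
    · simp [ctl_finish, ctl_flush, ctlRef, ctlAFold]
    · by_cases hb : blk = []
      · simp [ctl_finish, ctl_flush, ctlRef, ctlAFold, hb]
      · simp [ctl_finish, ctl_flush, ctlRef, ctlAFold, hb, ctl_join_popTrail,
          List.isEmpty_eq_false_iff]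
  | cons x xs ih =>
    intro M S h blk
    have hAx : ctlAFold (x :: xs) = ctl_stepA (ctlAFold xs) (0, x) := rfl
    rw [List.foldl_cons, ctl_stepB_eq, hAx]
    rcases hA : ctlAFold xs with ⟨s, m, t, i⟩
    rw [ctl_stepA_eq]
    cases hx : ctlIndented x with
    | true =>
      simp only [if_true]
      rcases h with _ | hd
      · rw [ih]; simp [ctlRef, hA]
      · rw [ih]
        have hT : ctlTemp (blk ++ [PySem.Str.strip x]) t =
            ctlTemp blk (if t = "" then PySem.Str.strip x
                         else PySem.Str.strip x ++ "\n" ++ t) := by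
          simp [ctlTemp, List.foldr_append]
        simp [ctlRef, hA, hT]
    | false =>
      simp only [if_false, Bool.false_eq_true]
      rcases h with _ | hd
      · simp only [ctl_flush]
        rw [ih]
        cases i with
        | false =>
          have ht : t = "" := by
            have := ctl_temp_of_not_intended xs; rw [hA] at this; exact this rfl
          simp [ctlRef, hA, ht]
        | true => simp [ctlRef, hA, ctlTemp]
      · by_cases hb : blk = []
        · subst hb
          simp only [ctl_flush, ne_eq, not_true_eq_false]
          rw [ih]
          cases i with
          | false =>
            have ht : t = "" := by
              have := ctl_temp_of_not_intended xs; rw [hA] at this; exact this rfl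
            simp [ctlRef, hA, ht]
          | true => simp [ctlRef, hA, ctlTemp]
        · simp only [ctl_flush, if_pos hb]
          rw [ih]
          have hj := ctl_join_popTrail blk
          cases i with
          | false =>
            have ht : t = "" := by
              have := ctl_temp_of_not_intended xs; rw [hA] at this; exact this rfl
            simp [ctlRef, hA, ht, hj, hb, List.isEmpty_eq_false_iff]
          | true =>
            simp [ctlRef, hA, ctlTemp, hj, hb, List.isEmpty_eq_false_iff]

theorem ctl_equal (cmds : List String) : command_to_list cmds = command_to_list_alt cmds := by
  unfold command_to_list command_to_list_alt
  rw [List.foldl_reverse, ctl_enum_foldr, ctl_main cmds [] [] none []]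
  rcases hA : ctlAFold cmds with ⟨s, m, t, i⟩
  simp [ctlRef]

-- ===== VERDICT (by name: the statement is the Claim_ definition above) =====
theorem command_to_list_spec : Claim_equal_command_to_list := by
  intro cmds _ _
  unfold Spec_command_to_list
  exact ctl_equal cmds
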